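-- pv_equiv track=rewrite | github.com/azharmateen/locale-forge | locale_forge/analyzer.py | find_missing_keys
-- ===== SOURCE A (Python) =====
-- def find_missing_keys(
--     source_keys: set[str],
--     locale_keys: dict[str, set[str]],
-- ) -> dict[str, list[str]]:
--     """Find keys used in source code but missing from locale files.
--
--     Args:
--         source_keys: Set of keys found in source code.
--         locale_keys: Dict mapping locale code to set of defined keys.
--
--     Returns:
--         Dict mapping locale code to list of missing keys.
--     """
--     missing: dict[str, list[str]] = {}
--
--     for locale, keys in locale_keys.items():
--         locale_missing = sorted(source_keys - keys)
--         if locale_missing: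
--             missing[locale] = locale_missing
--
--     return missing
-- ===== SOURCE B (Python) =====
-- def find_missing_keys(
--     source_keys: set[str],
--     locale_keys: dict[str, set[str]],
-- ) -> dict[str, list[str]]:
--     """Find keys used in source code but missing from locale files.
--
--     Transposed traversal: sort the source keys once, then sweep the sorted
--     keys in the OUTER loop, appending each key to every locale that lacks it
--     (the inner loop); locales with a non-empty list are kept at the end.
--     Appending in sorted-key order makes every per-locale list sorted without
--     any per-locale sort or set difference.
--     """
--     missing = {locale: [] for locale in locale_keys}
--     for key in sorted(source_keys):
--         for locale, keys in locale_keys.items():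
--             if key not in keys:
--                 missing[locale].append(key)
--     return {locale: lst for locale, lst in missing.items() if lst}
-- ===== Notes on version B (the rewrite author's own statement) =====
-- stated objective: alternative
-- what changed: B transposes the traversal: it sorts the source keys once, then the outer loop runs over the sorted keys and the inner loop over the locales, appending each key to every locale lacking it, keeping the non-empty lists at the end - instead of A's outer loop over locales with a set difference and a sort per locale.
import Mathlib
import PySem

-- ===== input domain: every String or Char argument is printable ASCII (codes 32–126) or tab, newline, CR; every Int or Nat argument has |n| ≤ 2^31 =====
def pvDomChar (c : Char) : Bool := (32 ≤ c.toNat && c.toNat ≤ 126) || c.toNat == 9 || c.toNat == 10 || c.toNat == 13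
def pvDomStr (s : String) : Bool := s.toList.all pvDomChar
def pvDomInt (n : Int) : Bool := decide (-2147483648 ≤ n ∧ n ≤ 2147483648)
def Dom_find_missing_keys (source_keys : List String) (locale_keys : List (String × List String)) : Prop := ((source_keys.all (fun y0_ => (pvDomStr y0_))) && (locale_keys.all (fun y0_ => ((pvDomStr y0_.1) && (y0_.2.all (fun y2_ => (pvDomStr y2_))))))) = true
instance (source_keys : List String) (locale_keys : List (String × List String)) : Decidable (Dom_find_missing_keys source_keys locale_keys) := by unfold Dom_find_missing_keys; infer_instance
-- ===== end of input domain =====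

-- B transposes the traversal: one global sort of the source keys, then an outer pass over the
-- sorted keys appending each key to every locale lacking it, keeping non-empty lists at the end.


-- ===== PORT A =====
def find_missing_keys (source_keys : List String) (locale_keys : List (String × List String)) : List (String × List String) :=
  (locale_keys.foldl
    (fun missing p =>
      let locale_missing := PySem.List.sorted (PySem.Set.diff source_keys p.2) (fun k => k) false
      if locale_missing = [] then missing else missing.insert p.1 locale_missing)
    PySem.Dict.empty).items

-- ===== PORT B =====
def find_missing_keys_alt (source_keys : List String) (locale_keys : List (String × List String)) : List (String × List String) :=
  let missing0 : PySem.Dict String (List String) :=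
    locale_keys.foldl (fun d p => d.insert p.1 ([] : List String)) PySem.Dict.empty
  let missing :=
    (PySem.List.sorted source_keys (fun k => k) false).foldl
      (fun d key =>
        locale_keys.foldl
          (fun d p =>
            if PySem.Set.contains p.2 key then d else d.modify p.1 [] (fun l => l ++ [key]))
          d)
      missing0
  -- final dict comprehension over the dict's (unique) keys = order-preserving filter of the items
  missing.items.filter (fun p => !p.2.isEmpty)

-- ===== PRECONDITION & SPEC =====
-- Pre_ requires the locale codes (the dict keys) to be pairwise distinct: a Python dict cannot
-- contain duplicate keys, so an association list with a repeated locale code encodes no Python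
-- input at all and the ports' behaviour there is representation-dependent.
def Pre_find_missing_keys (source_keys : List String) (locale_keys : List (String × List String)) : Prop :=
  (locale_keys.map Prod.fst).Nodup
instance (source_keys : List String) (locale_keys : List (String × List String)) : Decidable (Pre_find_missing_keys source_keys locale_keys) := by unfold Pre_find_missing_keys; infer_instance
def pvWitness_find_missing_keys : List String × (List (String × List String)) :=
  (["a", "b"], [("en", ["a"]), ("fr", ["a", "b"])])

def Spec_find_missing_keys (source_keys : List String) (locale_keys : List (String × List String)) (out : List (String × List String)) : Prop := out = find_missing_keys_alt source_keys locale_keys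
instance (source_keys : List String) (locale_keys : List (String × List String)) (out : List (String × List String)) : Decidable (Spec_find_missing_keys source_keys locale_keys out) := by unfold Spec_find_missing_keys; infer_instance

-- ===== CLAIM (what is proved, stated in full; the proofs are below) =====
def Claim_equal_find_missing_keys : Prop := ∀ (source_keys : List String) (locale_keys : List (String × List String)), Dom_find_missing_keys source_keys locale_keys → Pre_find_missing_keys source_keys locale_keys → Spec_find_missing_keys source_keys locale_keys (find_missing_keys source_keys locale_keys)

-- ===== LEMMAS AND PROOFS =====

-- the sorted missing list of one locale: sorting the set difference = filtering the sorted source list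
theorem sorted_diff_eq_filter_sorted (src keys : List String) :
    PySem.List.sorted (PySem.Set.diff src keys) (fun k => k) false
      = (PySem.List.sorted src (fun k => k) false).filter (fun k => !(PySem.Set.contains keys k)) := by
  apply PySem.List.sorted_id_eq_of_perm_of_pairwise
  · have hp : (PySem.List.sorted src (fun k => k) false).Perm src :=
      PySem.List.sorted_perm src (fun k => k) false
    simpa [PySem.Set.diff, PySem.Set.contains] using hp.filter (fun k => !(keys.contains k))
  · exact (PySem.List.sorted_pairwise src (fun k => k)).filter _

-- A's fold over fresh distinct locale keys appends exactly the non-empty entries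
theorem foldA_items (src : List String) : ∀ (L : List (String × List String))
    (d : PySem.Dict String (List String)),
    (L.map Prod.fst).Nodup → (∀ p ∈ L, d.contains p.1 = false) →
    (L.foldl
      (fun missing p =>
        if PySem.List.sorted (PySem.Set.diff src p.2) (fun k => k) false = [] then missing
        else missing.insert p.1 (PySem.List.sorted (PySem.Set.diff src p.2) (fun k => k) false))
      d).items
    = d.items ++ L.filterMap (fun p =>
        if PySem.List.sorted (PySem.Set.diff src p.2) (fun k => k) false = [] then none
        else some (p.1, PySem.List.sorted (PySem.Set.diff src p.2) (fun k => k) false)) := by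
  intro L
  induction L with
  | nil => intro d _ _; simp
  | cons p t ih =>
    intro d hnd hfresh
    simp only [List.map_cons, List.nodup_cons] at hnd
    have hfp : d.contains p.1 = false := hfresh p (by simp)
    simp only [List.foldl_cons, List.filterMap_cons]
    by_cases hm : PySem.List.sorted (PySem.Set.diff src p.2) (fun k => k) false = []
    · simp only [hm]
      exact ih d hnd.2 (fun q hq => hfresh q (by simp [hq]))
    · simp only [if_neg hm]
      rw [ih (d.insert p.1 _) hnd.2 ?_]
      · rw [PySem.Dict.items_insert_of_not_contains d _ hfp]
        simp
      · intro q hq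
        rw [PySem.Dict.contains_insert]
        have : q.1 ≠ p.1 := fun h => hnd.1 (h ▸ List.mem_map_of_mem hq)
        simp [this, hfresh q (by simp [hq])]

-- B's inner pass leaves every locale not in L untouched
theorem foldB_inner_untouched (key : String) : ∀ (L : List (String × List String))
    (d : PySem.Dict String (List String)) (x : String), x ∉ L.map Prod.fst →
    ((L.foldl (fun d p => if PySem.Set.contains p.2 key then d else d.modify p.1 [] (fun l => l ++ [key])) d).getD x [])
      = d.getD x [] := by
  intro L
  induction L with
  | nil => intro d x _; rfl
  | cons p t ih =>
    intro d x hx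
    simp only [List.map_cons, List.mem_cons, not_or] at hx
    simp only [List.foldl_cons]
    rw [ih _ x hx.2]
    split_ifs with hc
    · rfl
    · exact PySem.Dict.getD_modify_of_ne d [] _ hx.1

-- B's inner pass appends `key` to the list of locale x iff x's key set lacks it
theorem foldB_inner_getD (key : String) : ∀ (L : List (String × List String))
    (d : PySem.Dict String (List String)) (x : String) (kx : List String),
    (L.map Prod.fst).Nodup → (x, kx) ∈ L →
    ((L.foldl (fun d p => if PySem.Set.contains p.2 key then d else d.modify p.1 [] (fun l => l ++ [key])) d).getD x [])
      = if PySem.Set.contains kx key then d.getD x [] else d.getD x [] ++ [key] := by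
  intro L
  induction L with
  | nil => intro d x kx _ h; cases h
  | cons p t ih =>
    intro d x kx hnd hmem
    simp only [List.map_cons, List.nodup_cons] at hnd
    simp only [List.foldl_cons]
    rcases List.mem_cons.mp hmem with heq | hmem'
    · subst heq
      have hx : x ∉ t.map Prod.fst := hnd.1
      rw [foldB_inner_untouched key t _ x hx]
      split_ifs with hc
      · rfl
      · exact PySem.Dict.getD_modify_self d x [] _
    · have hxne : x ≠ p.1 := by
        intro h
        exact hnd.1 (h ▸ List.mem_map_of_mem (f := Prod.fst) hmem')
      rw [ih _ x kx hnd.2 hmem']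
      have hd : (if PySem.Set.contains p.2 key then d else d.modify p.1 [] (fun l => l ++ [key])).getD x [] = d.getD x [] := by
        split_ifs with hc
        · rfl
        · exact PySem.Dict.getD_modify_of_ne d [] _ hxne
      rw [hd]

-- B's outer pass accumulates, at locale x, the filter of the scanned source keys
theorem foldB_outer_getD (L : List (String × List String)) (x : String) (kx : List String)
    (hnd : (L.map Prod.fst).Nodup) (hmem : (x, kx) ∈ L) : ∀ (S : List String)
    (d : PySem.Dict String (List String)),
    ((S.foldl (fun d key => L.foldl (fun d p => if PySem.Set.contains p.2 key then d else d.modify p.1 [] (fun l => l ++ [key])) d) d).getD x [])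
      = d.getD x [] ++ S.filter (fun k => !(PySem.Set.contains kx k)) := by
  intro S
  induction S with
  | nil => intro d; simp
  | cons k S ih =>
    intro d
    simp only [List.foldl_cons, List.filter_cons]
    rw [ih, foldB_inner_getD k L d x kx hnd hmem]
    split_ifs with hc h2 <;> simp_all

-- B's inner pass never changes the key list of the dict (every locale is already present)
theorem foldB_inner_keys (key : String) : ∀ (L : List (String × List String))
    (d : PySem.Dict String (List String)), (∀ p ∈ L, d.contains p.1 = true) →
    (L.foldl (fun d p => if PySem.Set.contains p.2 key then d else d.modify p.1 [] (fun l => l ++ [key])) d).keys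
      = d.keys := by
  intro L
  induction L with
  | nil => intro d _; rfl
  | cons p t ih =>
    intro d h
    simp only [List.foldl_cons]
    have hstep : (if PySem.Set.contains p.2 key then d else d.modify p.1 [] (fun l => l ++ [key])).keys = d.keys := by
      split_ifs with hc
      · rfl
      · rw [PySem.Dict.keys_modify, PySem.Dict.keys_insert_of_contains _ _ (h p (by simp))]
    rw [ih _ ?_, hstep]
    intro q hq
    split_ifs with hc
    · exact h q (by simp [hq])
    · rw [PySem.Dict.contains_modify]
      simp [h q (by simp [hq])]

-- nor does the whole double pass
theorem foldB_keys (L : List (String × List String)) : ∀ (S : List String)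
    (d : PySem.Dict String (List String)), (∀ p ∈ L, d.contains p.1 = true) →
    (S.foldl (fun d key => L.foldl (fun d p => if PySem.Set.contains p.2 key then d else d.modify p.1 [] (fun l => l ++ [key])) d) d).keys
      = d.keys := by
  intro S
  induction S with
  | nil => intro d _; rfl
  | cons k S ih =>
    intro d h
    simp only [List.foldl_cons]
    have hk := foldB_inner_keys k L d h
    rw [ih _ ?_, hk]
    intro q hq
    rw [PySem.Dict.contains_iff_mem_keys, hk, ← PySem.Dict.contains_iff_mem_keys]
    exact h q hq

-- keep-if-nonempty as a filterMap vs a map followed by a filter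
theorem filterMap_nonempty (v : String × List String → List String) :
    ∀ (L : List (String × List String)),
    L.filterMap (fun p => if v p = [] then none else some (p.1, v p))
      = (L.map (fun p => (p.1, v p))).filter (fun q => !q.2.isEmpty) := by
  intro L
  induction L with
  | nil => rfl
  | cons p t ih =>
    simp only [List.filterMap_cons, List.map_cons, List.filter_cons]
    by_cases h : v p = []
    · simp [h, ih]
    · simp [h, ih, List.isEmpty_iff]

-- the two ports agree on distinct locale codes
theorem ports_agree (src : List String) (lk : List (String × List String))
    (hpre : (lk.map Prod.fst).Nodup) :
    find_missing_keys src lk = find_missing_keys_alt src lk := by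
  have hA : find_missing_keys src lk
      = lk.filterMap (fun p =>
          if PySem.List.sorted (PySem.Set.diff src p.2) (fun k => k) false = [] then none
          else some (p.1, PySem.List.sorted (PySem.Set.diff src p.2) (fun k => k) false)) := by
    have := foldA_items src lk PySem.Dict.empty hpre (fun p _ => by simp)
    simpa [find_missing_keys] using this
  set S := PySem.List.sorted src (fun k => k) false with hS
  set m0 := lk.foldl (fun d p => d.insert p.1 ([] : List String)) PySem.Dict.empty with hm0
  have h0items : m0.items = lk.map (fun p => (p.1, ([] : List String))) := by
    have := PySem.Dict.items_foldl_insert_fresh lk Prod.fst (fun _ => ([] : List String))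
      PySem.Dict.empty (fun a _ => by simp) hpre
    simpa [hm0] using this
  have h0keys : m0.keys = lk.map Prod.fst := by
    simp [PySem.Dict.keys, h0items, Function.comp]
  set M := S.foldl
      (fun d key => lk.foldl
        (fun d p => if PySem.Set.contains p.2 key then d else d.modify p.1 [] (fun l => l ++ [key])) d)
      m0 with hM
  have h0cont : ∀ p ∈ lk, m0.contains p.1 = true := by
    intro p hp
    rw [PySem.Dict.contains_iff_mem_keys, h0keys]
    exact List.mem_map_of_mem hp
  have hkeys : M.keys = lk.map Prod.fst := by
    rw [hM, foldB_keys lk S m0 h0cont, h0keys]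
  have hnodup : M.keys.Nodup := hkeys ▸ hpre
  have hgetD : ∀ p ∈ lk, M.getD p.1 [] = S.filter (fun k => !(PySem.Set.contains p.2 k)) := by
    intro p hp
    have hmem : (p.1, p.2) ∈ lk := by simpa using hp
    rw [hM, foldB_outer_getD lk p.1 p.2 hpre hmem S m0]
    have h0 : m0.getD p.1 [] = ([] : List String) := by
      apply PySem.Dict.getD_of_mem_items
      · rw [h0items]; exact List.mem_map_of_mem hp
      · exact h0keys ▸ hpre
    rw [h0]; rfl
  have hBitems : M.items = lk.map (fun p => (p.1, S.filter (fun k => !(PySem.Set.contains p.2 k)))) := by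
    rw [PySem.Dict.items_eq_map_keys M hnodup [], hkeys, List.map_map]
    exact List.map_congr_left (fun p hp => by simp [hgetD p hp])
  have hB : find_missing_keys_alt src lk
      = (lk.map (fun p => (p.1, S.filter (fun k => !(PySem.Set.contains p.2 k))))).filter (fun q => !q.2.isEmpty) := by
    rw [← hBitems]
    simp only [find_missing_keys_alt]
    rfl
  rw [hA, hB, ← filterMap_nonempty (fun p => S.filter (fun k => !(PySem.Set.contains p.2 k))) lk]
  simp only [sorted_diff_eq_filter_sorted, hS]

-- ===== VERDICT (by name: the statement is the Claim_ definition above) =====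
theorem find_missing_keys_spec : Claim_equal_find_missing_keys := by
  intro source_keys locale_keys _ hpre
  unfold Spec_find_missing_keys
  exact ports_agree source_keys locale_keys hpre
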